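-- pv_equiv track=rewrite | github.com/jonjlee-streamlit/prh-dash | src/figs.py | _hierarchy_from_row_groups
-- ===== SOURCE A (Python) =====
-- def _hierarchy_from_row_groups(groups, len):
--     """
--     Given a list of row groups as tuples: [(a,b), (c,d), ...], returns a new list with elements formatted
--     to provide a hierarchy grouping rows as specified. Elements not in any row group are represented by their
--     index. Elements in a one or more row group have their parent index, /, then the element index.
--     """
--     res = [str(i) for i in range(0, len)]
--     for i in range(0, len):
--         prefix = ""
--         for group_start, group_end in groups:
--             if group_start < i and group_end >= i:
--                 prefix = f"{prefix}{group_start}/"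
--                 res[i] = prefix + res[i]
--
--     return res
-- ===== SOURCE B (Python) =====
-- def _hierarchy_from_row_groups(groups, len):
--     # Event sweep: recompute the shared prefix string only at indices where some
--     # group's activity can change; every other row reuses the cached prefix.
--     if len <= 0:
--         return []
--     change = [False] * len
--     change[0] = True
--     for s, e in groups:
--         for p in (s + 1, e + 1):
--             if 0 < p < len:
--                 change[p] = True
--     res = []
--     P = ""
--     for i in range(len):
--         if change[i]:
--             P = ""
--             acc = ""
--             for s, e in groups:
--                 if s < i and e >= i:
--                     acc = f"{acc}{s}/"
--                     P = acc + P
--         res.append(P + str(i))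
--     return res
-- ===== Notes on version B (the rewrite author's own statement) =====
-- stated objective: faster
-- what changed: Replaces A's per-row rescan of every group by an event sweep: mark the few indices where some group's activity can change, recompute the shared hierarchy prefix only there and reuse the cached prefix for every other row.
import Mathlib
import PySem

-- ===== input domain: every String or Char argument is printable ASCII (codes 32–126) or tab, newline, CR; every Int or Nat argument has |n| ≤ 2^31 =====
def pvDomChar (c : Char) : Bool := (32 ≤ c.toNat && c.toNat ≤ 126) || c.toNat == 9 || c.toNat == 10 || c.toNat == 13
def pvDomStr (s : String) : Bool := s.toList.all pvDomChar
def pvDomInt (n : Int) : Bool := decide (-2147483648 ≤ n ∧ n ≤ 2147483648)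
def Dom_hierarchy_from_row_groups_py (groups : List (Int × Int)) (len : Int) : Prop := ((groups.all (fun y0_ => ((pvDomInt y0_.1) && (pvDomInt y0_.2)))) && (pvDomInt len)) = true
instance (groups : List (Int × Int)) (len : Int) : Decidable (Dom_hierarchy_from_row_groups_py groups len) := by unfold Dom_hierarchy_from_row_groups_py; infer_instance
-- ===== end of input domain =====

-- B replaces A's per-row rescan of all groups by an event sweep that recomputes
-- the shared prefix only at indices where group activity can change (faster).


-- ===== PORT A =====
-- body of A's inner 'for group_start, group_end in groups' loop: state (prefix, res)
def pvInnerA (i : Int) (st : String × List String) (g : Int × Int) : String × List String :=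
  if g.1 < i ∧ g.2 ≥ i then
    let pfx := st.1 ++ PySem.Int.toStr g.1 ++ "/"
    -- res[i] = pfx + res[i]; i is always 0 ≤ i < len here, so getD/setD are exact
    (pfx, PySem.List.pySetD st.2 i (pfx ++ PySem.List.pyGetD st.2 i ""))
  else st

def hierarchy_from_row_groups_py (groups : List (Int × Int)) (len : Int) : List String :=
  let res0 : List String := (PySem.List.pyRange 0 len 1).map PySem.Int.toStr
  (PySem.List.pyRange 0 len 1).foldl (fun res i => (groups.foldl (pvInnerA i) ("", res)).2) res0

-- ===== PORT B =====
-- body of Source B's prefix-recompute loop: state (acc, P)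
def pvInnerB (i : Int) (pc : String × String) (g : Int × Int) : String × String :=
  if g.1 < i ∧ g.2 ≥ i then
    let acc := pc.1 ++ PySem.Int.toStr g.1 ++ "/"
    (acc, acc ++ pc.2)
  else pc

-- Source B: 'for p in (s + 1, e + 1): if 0 < p < len: change[p] = True' (guard keeps p in range)
def pvMark (len : Int) (ch : List Bool) (g : Int × Int) : List Bool :=
  [g.1 + 1, g.2 + 1].foldl (fun ch p => if 0 < p ∧ p < len then PySem.List.pySetD ch p true else ch) ch

-- Source B: one sweep iteration: recompute P at a change point, append P + str(i)
def pvSweepStep (groups : List (Int × Int)) (change : List Bool) (st : String × List String) (i : Int) : String × List String :=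
  let P := if PySem.List.pyGetD change i false then (groups.foldl (pvInnerB i) ("", "")).2 else st.1
  (P, st.2 ++ [P ++ PySem.Int.toStr i])

def hierarchy_from_row_groups_py_alt (groups : List (Int × Int)) (len : Int) : List String :=
  if len ≤ 0 then []
  else
    let change := groups.foldl (pvMark len) (PySem.List.pySetD (List.replicate len.toNat false) 0 true)
    ((PySem.List.pyRange 0 len 1).foldl (pvSweepStep groups change) ("", [])).2

-- ===== PRECONDITION & SPEC =====
def Spec_hierarchy_from_row_groups_py (groups : List (Int × Int)) (len : Int) (out : List String) : Prop := out = hierarchy_from_row_groups_py_alt groups len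
instance (groups : List (Int × Int)) (len : Int) (out : List String) : Decidable (Spec_hierarchy_from_row_groups_py groups len out) := by unfold Spec_hierarchy_from_row_groups_py; infer_instance

-- ===== CLAIM (what is proved, stated in full; the proofs are below) =====
def Claim_equal_hierarchy_from_row_groups_py : Prop := ∀ (groups : List (Int × Int)) (len : Int), Dom_hierarchy_from_row_groups_py groups len → Spec_hierarchy_from_row_groups_py groups len (hierarchy_from_row_groups_py groups len)

-- ===== LEMMAS AND PROOFS =====

-- the hierarchy prefix of row i, and the full string of row i
def pvC (groups : List (Int × Int)) (i : Int) : String := (groups.foldl (pvInnerB i) ("", "")).2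
def pvF (groups : List (Int × Int)) (i : Int) : String := pvC groups i ++ PySem.Int.toStr i

-- get/set bookkeeping for an in-range Int index
lemma getD_setD_self {α : Type} (xs : List α) (i : Int) (v d : α) (h0 : 0 ≤ i) (h1 : i < (xs.length : Int)) :
    PySem.List.pyGetD (PySem.List.pySetD xs i v) i d = v := by
  rw [PySem.List.pySetD_of_nonneg _ _ h0, PySem.List.pyGetD_eq_getElem _ _ h0 (by simpa using h1)]
  rw [List.getElem_set_self]

lemma setD_setD {α : Type} (xs : List α) (i : Int) (v w : α) (h0 : 0 ≤ i) :
    PySem.List.pySetD (PySem.List.pySetD xs i v) i w = PySem.List.pySetD xs i w := by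
  rw [PySem.List.pySetD_of_nonneg _ _ h0, PySem.List.pySetD_of_nonneg _ _ h0,
      PySem.List.pySetD_of_nonneg _ _ h0, List.set_set]

lemma setD_getD_self {α : Type} (xs : List α) (i : Int) (d : α) (h0 : 0 ≤ i) (h1 : i < (xs.length : Int)) :
    PySem.List.pySetD xs i (PySem.List.pyGetD xs i d) = xs := by
  rw [PySem.List.pySetD_of_nonneg _ _ h0, PySem.List.pyGetD_eq_getElem _ _ h0 h1]
  apply List.set_getElem_self

-- the P-component of B's inner fold is a prepend homomorphism in its start value
lemma pvInnerB_hom (gs : List (Int × Int)) (i : Int) (p c : String) :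
    gs.foldl (pvInnerB i) (p, c) =
      ((gs.foldl (pvInnerB i) (p, "")).1, (gs.foldl (pvInnerB i) (p, "")).2 ++ c) := by
  induction gs generalizing p c with
  | nil => simp
  | cons g gs ih =>
    simp only [List.foldl_cons, pvInnerB]
    by_cases h : g.1 < i ∧ g.2 ≥ i
    · rw [if_pos h, if_pos h]
      rw [ih (p ++ PySem.Int.toStr g.1 ++ "/") ((p ++ PySem.Int.toStr g.1 ++ "/") ++ c),
          ih (p ++ PySem.Int.toStr g.1 ++ "/") ((p ++ PySem.Int.toStr g.1 ++ "/") ++ "")]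
      simp [String.append_assoc]
    · rw [if_neg h, if_neg h]
      exact ih p c

-- A's inner loop only rewrites res[i], prepending exactly B's recomputed prefix
lemma pvInnerA_eq (gs : List (Int × Int)) (i : Int) (p : String) (res : List String)
    (h0 : 0 ≤ i) (h1 : i < (res.length : Int)) :
    gs.foldl (pvInnerA i) (p, res) =
      ((gs.foldl (pvInnerB i) (p, "")).1,
        PySem.List.pySetD res i ((gs.foldl (pvInnerB i) (p, "")).2 ++ PySem.List.pyGetD res i "")) := by
  induction gs generalizing p res h1 with
  | nil =>
    simp only [List.foldl_nil]
    rw [String.empty_append, setD_getD_self _ _ _ h0 h1]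
  | cons g gs ih =>
    simp only [List.foldl_cons, pvInnerA, pvInnerB]
    by_cases h : g.1 < i ∧ g.2 ≥ i
    · rw [if_pos h, if_pos h]
      set p' := p ++ PySem.Int.toStr g.1 ++ "/" with hp'
      rw [ih p' _ (by rw [PySem.List.length_pySetD]; exact h1)]
      rw [pvInnerB_hom gs i p' (p' ++ "")]
      rw [getD_setD_self _ _ _ _ h0 h1, setD_setD _ _ _ _ h0]
      simp [hp', String.append_assoc]
    · rw [if_neg h, if_neg h]
      exact ih p res h1

-- A computes row i's string independently for each i
lemma LoutA (groups : List (Int × Int)) (len : Int) :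
    ∀ (n : Nat) (a : Int) (pre : List String), 0 ≤ a → a + n = len → (pre.length : Int) = a →
    (PySem.List.pyRange a len 1).foldl (fun res i => (groups.foldl (pvInnerA i) ("", res)).2)
        (pre ++ (PySem.List.pyRange a len 1).map PySem.Int.toStr)
      = pre ++ (PySem.List.pyRange a len 1).map (pvF groups) := by
  intro n
  induction n with
  | zero =>
    intro a pre h0 hn hp
    rw [PySem.List.pyRange_one_eq_nil (by omega)]
    simp
  | succ m ih =>
    intro a pre h0 hn hp
    rw [PySem.List.pyRange_one_cons (by omega)]
    simp only [List.map_cons, List.foldl_cons]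
    obtain rfl : a = (pre.length : Int) := hp.symm
    set rest := (PySem.List.pyRange ((pre.length : Int) + 1) len 1).map PySem.Int.toStr with hrest
    rw [pvInnerA_eq groups (pre.length : Int) "" (pre ++ PySem.Int.toStr (pre.length : Int) :: rest) h0
        (by simp)]
    have hget : PySem.List.pyGetD (pre ++ PySem.Int.toStr (pre.length : Int) :: rest) (pre.length : Int) ""
        = PySem.Int.toStr (pre.length : Int) := by
      rw [PySem.List.pyGetD_natCast, List.getD_eq_getElem?_getD, List.getElem?_append_right (le_refl _)]
      simp
    have hset : ∀ v : String, PySem.List.pySetD (pre ++ PySem.Int.toStr (pre.length : Int) :: rest) (pre.length : Int) v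
        = pre ++ v :: rest := by
      intro v
      rw [PySem.List.pySetD_natCast, List.set_append_right _ _ (le_refl _)]
      simp
    rw [hget, hset]
    have := ih ((pre.length : Int) + 1) (pre ++ [pvF groups (pre.length : Int)]) (by omega) (by omega)
      (by simp)
    simp only [List.append_assoc, List.singleton_append] at this
    rw [← hrest] at this
    show List.foldl _ (pre ++ ((List.foldl (pvInnerB (pre.length : Int)) ("", "") groups).2 ++ PySem.Int.toStr (pre.length : Int)) :: rest) _ = _
    rw [show (List.foldl (pvInnerB (pre.length : Int)) ("", "") groups).2 ++ PySem.Int.toStr (pre.length : Int) = pvF groups (pre.length : Int) from rfl]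
    exact this

lemma A_eq_map (groups : List (Int × Int)) (len : Int) :
    hierarchy_from_row_groups_py groups len = (PySem.List.pyRange 0 len 1).map (pvF groups) := by
  by_cases hl : 0 ≤ len
  · have := LoutA groups len len.toNat 0 [] (le_refl _) (by omega) (by simp)
    simpa [hierarchy_from_row_groups_py] using this
  · simp [hierarchy_from_row_groups_py, PySem.List.pyRange_one_eq_nil (by omega : len ≤ 0)]

-- one conditional 'change[p] = True'
lemma set1_getD (ch : List Bool) (p i len : Int) (h0 : 0 ≤ i) (h1 : i < (ch.length : Int)) :
    PySem.List.pyGetD (if 0 < p ∧ p < len then PySem.List.pySetD ch p true else ch) i false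
      = (PySem.List.pyGetD ch i false || decide (p = i ∧ 0 < i ∧ i < len)) := by
  split_ifs with hc
  · by_cases hpi : p = i
    · subst hpi
      rw [getD_setD_self _ _ _ _ h0 h1]
      simp [hc]
    · rw [PySem.List.pySetD_of_nonneg _ _ (by omega), PySem.List.pyGetD_eq_getElem _ _ h0 (by simpa using h1),
          PySem.List.pyGetD_eq_getElem _ _ h0 h1]
      rw [List.getElem_set_ne (by omega)]
      simp [hpi]
  · have : ¬ (p = i ∧ 0 < i ∧ i < len) := by omega
    simp [this]

-- characterisation of B's change array
lemma mark_getD (gs : List (Int × Int)) (len : Int) (ch : List Bool) (i : Int)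
    (h0 : 0 ≤ i) (h1 : i < (ch.length : Int)) :
    PySem.List.pyGetD (gs.foldl (pvMark len) ch) i false =
      (PySem.List.pyGetD ch i false ||
        gs.any (fun g => decide ((g.1 + 1 = i ∨ g.2 + 1 = i) ∧ 0 < i ∧ i < len))) := by
  induction gs generalizing ch h1 with
  | nil => simp
  | cons g gs ih =>
    rw [List.foldl_cons, ih _ (by
      simp only [pvMark, List.foldl_cons, List.foldl_nil]
      split_ifs <;> simpa [PySem.List.length_pySetD] using h1)]
    simp only [pvMark, List.foldl_cons, List.foldl_nil]
    rw [set1_getD _ _ _ _ h0 (by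
        split_ifs <;> simpa [PySem.List.length_pySetD] using h1),
      set1_getD _ _ _ _ h0 h1]
    simp only [List.any_cons]
    have hd : decide ((g.1 + 1 = i ∨ g.2 + 1 = i) ∧ 0 < i ∧ i < len)
        = (decide (g.1 + 1 = i ∧ 0 < i ∧ i < len) || decide (g.2 + 1 = i ∧ 0 < i ∧ i < len)) := by
      by_cases hA : g.1 + 1 = i ∧ 0 < i ∧ i < len <;> by_cases hB : g.2 + 1 = i ∧ 0 < i ∧ i < len <;>
        · simp [hA, hB]
          try omega
    rw [hd]
    simp [Bool.or_assoc, Bool.or_comm, Bool.or_left_comm]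

def pvAny (groups : List (Int × Int)) (i len : Int) : Bool :=
  groups.any (fun g => decide ((g.1 + 1 = i ∨ g.2 + 1 = i) ∧ 0 < i ∧ i < len))

-- if no group starts or ends between i-1 and i, the prefix is unchanged
lemma pvC_stable (groups : List (Int × Int)) (i : Int)
    (h : ∀ g ∈ groups, g.1 + 1 ≠ i ∧ g.2 + 1 ≠ i) :
    pvC groups i = pvC groups (i - 1) := by
  unfold pvC
  have heq : List.foldl (pvInnerB i) ("", "") groups = List.foldl (pvInnerB (i - 1)) ("", "") groups := by
    apply PySem.List.foldl_congr_mem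
    intro acc g hg
    have := h g hg
    simp only [pvInnerB]
    by_cases hc : g.1 < i ∧ g.2 ≥ i
    · rw [if_pos hc, if_pos (by omega)]
    · rw [if_neg hc, if_neg (by omega)]
  rw [heq]

lemma init_getD (len i : Int) (h0 : 0 ≤ i) (h1 : i < len) :
    PySem.List.pyGetD (PySem.List.pySetD (List.replicate len.toNat false) 0 true) i false
      = decide (i = 0) := by
  rw [PySem.List.pySetD_of_nonneg _ _ (le_refl 0),
      PySem.List.pyGetD_eq_getElem _ _ h0 (by simp; omega)]
  by_cases hi : i = 0
  · subst hi; simp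
  · rw [List.getElem_set_ne (by omega)]
    simp [List.getElem_replicate, hi]

-- B's sweep produces rows a..len-1 given a correct cache P
lemma B_sweep (groups : List (Int × Int)) (len : Int) (change : List Bool)
    (hch : ∀ i : Int, 0 ≤ i → i < len →
      PySem.List.pyGetD change i false = (decide (i = 0) || pvAny groups i len)) :
    ∀ (n : Nat) (a : Int) (P : String) (out : List String), 0 ≤ a → a + n = len →
      (a = 0 ∨ P = pvC groups (a - 1)) →
      ((PySem.List.pyRange a len 1).foldl (pvSweepStep groups change) (P, out)).2 =
        out ++ (PySem.List.pyRange a len 1).map (pvF groups) := by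
  intro n
  induction n with
  | zero =>
    intro a P out h0 hn _
    rw [PySem.List.pyRange_one_eq_nil (by omega)]
    simp
  | succ m ih =>
    intro a P out h0 hn hP
    rw [PySem.List.pyRange_one_cons (by omega)]
    simp only [List.foldl_cons, List.map_cons]
    have hP' : (pvSweepStep groups change (P, out) a).1 = pvC groups a := by
      simp only [pvSweepStep]
      by_cases hg : PySem.List.pyGetD change a false
      · simp [hg, pvC]
      · simp only [Bool.not_eq_true] at hg
        have hc := hch a h0 (by omega)
        rw [hg] at hc
        have hor := hc.symm
        rw [Bool.or_eq_false_iff] at hor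
        have ha0 : a ≠ 0 := by simpa using hor.1
        have hne : ∀ g ∈ groups, g.1 + 1 ≠ a ∧ g.2 + 1 ≠ a := by
          have h2 := hor.2
          simp only [pvAny, List.any_eq_false] at h2
          intro g hgm
          have := h2 g hgm
          simp only [decide_eq_true_eq] at this
          constructor <;> intro hh <;> exact this (by simp at this ⊢; omega)
        rcases hP with h00 | hPv
        · omega
        · rw [if_neg (by simp [hg]), hPv, ← pvC_stable groups a hne]
    have hstep : pvSweepStep groups change (P, out) a
        = (pvC groups a, out ++ [pvC groups a ++ PySem.Int.toStr a]) := by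
      have h2 : (pvSweepStep groups change (P, out) a).2
          = out ++ [(pvSweepStep groups change (P, out) a).1 ++ PySem.Int.toStr a] := rfl
      rw [Prod.ext_iff]
      exact ⟨hP', by rw [h2, hP']⟩
    rw [hstep, ih (a + 1) (pvC groups a) (out ++ [pvC groups a ++ PySem.Int.toStr a]) (by omega) (by omega)
      (Or.inr (by rw [show a + 1 - 1 = a by ring]))]
    simp [pvF]

lemma B_eq_map (groups : List (Int × Int)) (len : Int) :
    hierarchy_from_row_groups_py_alt groups len = (PySem.List.pyRange 0 len 1).map (pvF groups) := by
  unfold hierarchy_from_row_groups_py_alt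
  by_cases hl : len ≤ 0
  · rw [if_pos hl, PySem.List.pyRange_one_eq_nil hl]
    simp
  · rw [if_neg hl]
    have hch : ∀ i : Int, 0 ≤ i → i < len →
        PySem.List.pyGetD (groups.foldl (pvMark len) (PySem.List.pySetD (List.replicate len.toNat false) 0 true)) i false
          = (decide (i = 0) || pvAny groups i len) := by
      intro i h0 h1
      rw [mark_getD _ _ _ _ h0 (by simp [PySem.List.length_pySetD]; omega), init_getD len i h0 h1]
      rfl
    have := B_sweep groups len _ hch len.toNat 0 "" [] (le_refl 0) (by omega) (Or.inl rfl)
    simpa using this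

-- ===== VERDICT (by name: the statement is the Claim_ definition above) =====
theorem hierarchy_from_row_groups_py_spec : Claim_equal_hierarchy_from_row_groups_py := by
  intro groups len _
  unfold Spec_hierarchy_from_row_groups_py
  rw [A_eq_map, B_eq_map]
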